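-- pv_equiv track=rewrite | github.com/zzm-coder/Hybrid-rag-for-IR-course | 3_QA_creat_new.py | trim_subgraph_triples
-- ===== SOURCE A (Python) =====
-- from typing import List, Dict, Any, Optional, Set, Tuple
--
-- def trim_subgraph_triples(triples: List[Dict], max_relations: int = 10, current_source: str = "") -> List[Dict]:
--     triples_sorted = sorted(triples, key=lambda x: x.get("source", "") != current_source)
--     selected = triples_sorted[:max_relations]
--     trimmed = []
--     for t in selected:
--         para = t.get("paragraph", "")
--         if len(para) > 200:
--             para = para[:200] + "..."
--         trimmed.append({
--             "head": t.get("head", ""),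
--             "relation": t.get("relation", ""),
--             "tail": t.get("tail", ""),
--             "source": t.get("source", ""),
--             "paragraph": para
--         })
--     return trimmed
-- ===== SOURCE B (Python) =====
-- def _trim_one(t):
--     para = t.get("paragraph", "")
--     if len(para) > 200:
--         para = para[:200] + "..."
--     return {
--         "head": t.get("head", ""),
--         "relation": t.get("relation", ""),
--         "tail": t.get("tail", ""),
--         "source": t.get("source", ""),
--         "paragraph": para,
--     }
--
--
-- def trim_subgraph_triples(triples, max_relations=10, current_source=""):
--     # stable partition into matching / non-matching, then slice and trim
--     matching = []
--     others = []
--     for t in triples: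
--         if t.get("source", "") == current_source:
--             matching.append(t)
--         else:
--             others.append(t)
--     return [_trim_one(t) for t in (matching + others)[:max_relations]]
-- ===== Notes on version B (the rewrite author's own statement) =====
-- stated objective: alternative
-- what changed: Replaces the stable sort by a boolean match-key with a single-pass stable partition into matching/non-matching lists, concatenated and sliced to max_relations before trimming paragraphs.
import Mathlib
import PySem

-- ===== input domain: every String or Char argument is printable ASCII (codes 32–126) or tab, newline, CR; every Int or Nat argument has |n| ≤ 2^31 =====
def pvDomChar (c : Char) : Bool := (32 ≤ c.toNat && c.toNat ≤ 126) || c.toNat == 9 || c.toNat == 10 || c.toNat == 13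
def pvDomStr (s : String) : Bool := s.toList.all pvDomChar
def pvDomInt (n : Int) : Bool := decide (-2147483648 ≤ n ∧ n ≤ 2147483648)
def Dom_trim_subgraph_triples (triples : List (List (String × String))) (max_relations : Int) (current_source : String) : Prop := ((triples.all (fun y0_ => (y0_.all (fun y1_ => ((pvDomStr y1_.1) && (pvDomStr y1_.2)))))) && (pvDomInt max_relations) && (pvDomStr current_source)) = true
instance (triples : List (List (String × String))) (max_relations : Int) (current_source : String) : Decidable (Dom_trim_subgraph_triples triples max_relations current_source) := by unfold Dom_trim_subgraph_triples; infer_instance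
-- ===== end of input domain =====

-- ===== PORT A =====
-- B replaces A's stable boolean-key sort by a one-pass stable partition of the triples; return value equivalence.
-- t.get(k, "") on a dict modelled as an association list
def pvGet (t : List (String × String)) (k : String) (d : String) : String :=
  PySem.Dict.getD ⟨t⟩ k d

-- the loop body both Pythons share: trim one triple dict (paragraph capped at 200 chars + "...")
def pvTrimOne (t : List (String × String)) : List (String × String) :=
  let para := pvGet t "paragraph" ""
  let para := if 200 < PySem.Str.len para then PySem.Str.slice para none (some 200) ++ "..." else para
  [("head", pvGet t "head" ""),
   ("relation", pvGet t "relation" ""),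
   ("tail", pvGet t "tail" ""),
   ("source", pvGet t "source" ""),
   ("paragraph", para)]

def trim_subgraph_triples (triples : List (List (String × String))) (max_relations : Int) (current_source : String) : List (List (String × String)) :=
  let triples_sorted := PySem.List.sorted triples (fun x => decide (pvGet x "source" "" ≠ current_source)) false
  let selected := PySem.List.slice triples_sorted none (some max_relations)
  selected.foldl (fun trimmed t => trimmed ++ [pvTrimOne t]) []

-- ===== PORT B =====
def trim_subgraph_triples_alt (triples : List (List (String × String))) (max_relations : Int) (current_source : String) : List (List (String × String)) :=
  let p := triples.foldl
    (fun (p : List (List (String × String)) × List (List (String × String))) t =>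
      if pvGet t "source" "" == current_source then (p.1 ++ [t], p.2) else (p.1, p.2 ++ [t]))
    ([], [])
  (PySem.List.slice (p.1 ++ p.2) none (some max_relations)).map pvTrimOne

-- ===== PRECONDITION & SPEC =====
def Spec_trim_subgraph_triples (triples : List (List (String × String))) (max_relations : Int) (current_source : String) (out : List (List (String × String))) : Prop := out = trim_subgraph_triples_alt triples max_relations current_source
instance (triples : List (List (String × String))) (max_relations : Int) (current_source : String) (out : List (List (String × String))) : Decidable (Spec_trim_subgraph_triples triples max_relations current_source out) := by unfold Spec_trim_subgraph_triples; infer_instance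

-- ===== CLAIM (what is proved, stated in full; the proofs are below) =====
def Claim_equal_trim_subgraph_triples : Prop := ∀ (triples : List (List (String × String))) (max_relations : Int) (current_source : String), Dom_trim_subgraph_triples triples max_relations current_source → Spec_trim_subgraph_triples triples max_relations current_source (trim_subgraph_triples triples max_relations current_source)

-- ===== LEMMAS AND PROOFS =====
-- the boolean key of A's sort
def pvKey (cur : String) (t : List (String × String)) : Bool := decide (pvGet t "source" "" ≠ cur)

lemma insertBy_key_true {cur : String} (x : List (String × String)) (hx : pvKey cur x = true)
    (L : List (List (String × String))) :
    PySem.List.insertBy (fun a b => decide (pvKey cur a < pvKey cur b)) x L = L ++ [x] := by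
  apply PySem.List.insertBy_of_forall_not_before
  intro y _
  rw [hx]
  cases pvKey cur y <;> decide

lemma insertBy_key_false {cur : String} (x : List (String × String)) (hx : pvKey cur x = false)
    (F T : List (List (String × String)))
    (hF : ∀ t ∈ F, pvKey cur t = false) (hT : ∀ t ∈ T, pvKey cur t = true) :
    PySem.List.insertBy (fun a b => decide (pvKey cur a < pvKey cur b)) x (F ++ T) = F ++ x :: T := by
  induction F with
  | nil =>
    cases T with
    | nil => rfl
    | cons t T' =>
      have ht : pvKey cur t = true := hT t (by simp)
      simp [PySem.List.insertBy, hx, ht]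
  | cons f F' ih =>
    have hf : pvKey cur f = false := hF f (by simp)
    have := ih (fun t ht => hF t (by simp [ht]))
    simp [PySem.List.insertBy, hx, hf] at this ⊢
    exact this

lemma sort_loop {cur : String} (xs : List (List (String × String)))
    (F T : List (List (String × String)))
    (hF : ∀ t ∈ F, pvKey cur t = false) (hT : ∀ t ∈ T, pvKey cur t = true) :
    xs.foldl (fun acc x => PySem.List.insertBy (fun a b => decide (pvKey cur a < pvKey cur b)) x acc) (F ++ T)
      = (F ++ xs.filter (fun t => !pvKey cur t)) ++ (T ++ xs.filter (fun t => pvKey cur t)) := by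
  induction xs generalizing F T with
  | nil => simp
  | cons x xs ih =>
    simp only [List.foldl_cons]
    cases hx : pvKey cur x with
    | false =>
      rw [insertBy_key_false x hx F T hF hT]
      have hF' : ∀ t ∈ F ++ [x], pvKey cur t = false := by
        intro t ht
        rcases List.mem_append.mp ht with h | h
        · exact hF t h
        · simp only [List.mem_singleton] at h; rw [h]; exact hx
      have := ih (F ++ [x]) T hF' hT
      simp only [List.append_assoc, List.singleton_append] at this
      rw [this]
      simp [hx, List.append_assoc]
    | true =>
      rw [insertBy_key_true x hx (F ++ T), List.append_assoc]
      have hT' : ∀ t ∈ T ++ [x], pvKey cur t = true := by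
        intro t ht
        rcases List.mem_append.mp ht with h | h
        · exact hT t h
        · simp only [List.mem_singleton] at h; rw [h]; exact hx
      have := ih F (T ++ [x]) hF hT'
      rw [List.append_assoc] at this
      rw [this]
      simp [hx, List.append_assoc]

lemma sorted_bool_eq_partition (cur : String) (xs : List (List (String × String))) :
    PySem.List.sorted xs (pvKey cur) false
      = xs.filter (fun t => !pvKey cur t) ++ xs.filter (fun t => pvKey cur t) := by
  rw [PySem.List.sorted_eq_foldl_insertBy]
  have := sort_loop (cur := cur) xs [] [] (by simp) (by simp)
  simpa using this

lemma partition_loop (cur : String) (xs : List (List (String × String)))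
    (M O : List (List (String × String))) :
    xs.foldl (fun (p : List (List (String × String)) × List (List (String × String))) t =>
        if pvGet t "source" "" == cur then (p.1 ++ [t], p.2) else (p.1, p.2 ++ [t])) (M, O)
      = (M ++ xs.filter (fun t => pvGet t "source" "" == cur),
         O ++ xs.filter (fun t => !(pvGet t "source" "" == cur))) := by
  induction xs generalizing M O with
  | nil => simp
  | cons x xs ih =>
    simp only [List.foldl_cons]
    cases h : (pvGet x "source" "" == cur) <;>
      · simp only [h, Bool.false_eq_true, if_false, if_true]
        rw [ih]
        simp [h]

-- ===== VERDICT (by name: the statement is the Claim_ definition above) =====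
theorem trim_subgraph_triples_spec : Claim_equal_trim_subgraph_triples := by
  intro triples max_relations current_source _
  unfold Spec_trim_subgraph_triples trim_subgraph_triples trim_subgraph_triples_alt
  rw [partition_loop, PySem.List.foldl_append_singleton_eq_map]
  rw [show (fun x => decide (pvGet x "source" "" ≠ current_source)) = pvKey current_source from rfl]
  rw [sorted_bool_eq_partition]
  simp only [List.nil_append]
  have h1 : List.filter (fun t => pvGet t "source" "" == current_source) triples
      = List.filter (fun t => !pvKey current_source t) triples :=
    List.filter_congr (by
      intro t _
      by_cases h : pvGet t "source" "" = current_source <;> simp [pvKey, h])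
  have h2 : List.filter (fun t => !(pvGet t "source" "" == current_source)) triples
      = List.filter (fun t => pvKey current_source t) triples :=
    List.filter_congr (by
      intro t _
      by_cases h : pvGet t "source" "" = current_source <;> simp [pvKey, h])
  rw [h1, h2]
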